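-- pv_equiv track=rewrite | github.com/cockpit-project/cockpit | test/common/js_coverage.py | find_line_starts
-- ===== SOURCE A (Python) =====
-- from collections.abc import Callable, Iterable, Sequence
--
-- def find_line_starts(text: str) -> Sequence[int]:
--     result: list[int] = []
--     try:
--         line_start = 0
--         while True:
--             result.append(line_start)
--             line_start = text.index('\n', line_start) + 1
--     except ValueError:
--         if not text.endswith('\n'):
--             result.append(len(text) + 1)  # pretend...
--         return result
-- ===== SOURCE B (Python) =====
-- def find_line_starts(text: str):
--     result = [0] + [i + 1 for i, c in enumerate(text) if c == '\n']
--     if not text.endswith('\n'):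
--         result.append(len(text) + 1)  # pretend... (A's trailing sentinel, kept)
--     return result
-- ===== Notes on version B (the rewrite author's own statement) =====
-- stated objective: simpler
-- what changed: Replaces A's exception-terminated text.index jump loop (try/except ValueError as control flow) with a single comprehension over enumerate(text) that collects i+1 for each newline character, prefixed by the constant 0; the trailing len(text)+1 sentinel is kept.
import Mathlib
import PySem

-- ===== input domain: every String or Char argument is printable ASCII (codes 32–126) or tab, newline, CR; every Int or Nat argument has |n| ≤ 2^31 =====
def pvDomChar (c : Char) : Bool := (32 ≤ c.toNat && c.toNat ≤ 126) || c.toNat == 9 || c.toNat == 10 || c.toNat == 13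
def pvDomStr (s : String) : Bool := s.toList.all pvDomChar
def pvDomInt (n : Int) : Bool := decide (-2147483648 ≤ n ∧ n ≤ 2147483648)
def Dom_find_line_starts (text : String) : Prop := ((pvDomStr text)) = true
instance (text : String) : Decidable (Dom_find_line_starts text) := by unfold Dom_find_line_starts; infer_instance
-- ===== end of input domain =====

-- B replaces A's exception-terminated index('\n', pos) jump loop by a comprehension
-- over enumerate(text) collecting i+1 for each newline (objective: simpler).


-- ===== PORT A =====
-- bounds of text.index('\n', k): needed by the port for termination (cited in decreasing_by)
theorem pvFindBounds (cs : List Char) (k : Nat) (hk : k ≤ cs.length)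
    (h : ¬ PySem.Chars.findFrom cs ['\n'] k none = -1) :
    k ≤ (PySem.Chars.findFrom cs ['\n'] k none).toNat ∧
    (PySem.Chars.findFrom cs ['\n'] k none).toNat < cs.length := by
  obtain ⟨h1, h2, _⟩ := PySem.Chars.findFrom_natCast_spec cs ['\n'] k hk h
  refine ⟨by exact_mod_cast Int.toNat_le_toNat h1, ?_⟩
  by_contra hlen
  rw [List.drop_eq_nil_of_le (by omega)] at h2
  simpa using h2.length_le

-- the while-True loop of A: append line_start, then jump to text.index('\n', line_start) + 1;
-- ValueError (findFrom = -1) ends the loop.  hk is the loop invariant needed for termination.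
def findLineStartsGo (cs : List Char) (k : Nat) (hk : k ≤ cs.length) (acc : List Int) : List Int :=
  let acc' := acc ++ [(k : Int)]
  if h : PySem.Chars.findFrom cs ['\n'] k none = -1 then
    if PySem.Chars.endswith cs ['\n'] then acc'
    else acc' ++ [((cs.length : Int) + 1)]   -- pretend...
  else
    findLineStartsGo cs ((PySem.Chars.findFrom cs ['\n'] k none).toNat + 1)
      (by have := pvFindBounds cs k hk h; omega) acc'
termination_by cs.length - k
decreasing_by
  have := pvFindBounds cs k hk h; omega

def find_line_starts (text : String) : List Int :=
  findLineStartsGo text.toList 0 (Nat.zero_le _) []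

-- ===== PORT B =====
def find_line_starts_alt (text : String) : List Int :=
  let result := (0 : Int) ::
    (((PySem.List.enumerate text.toList 0).filter (fun p => p.2 == '\n')).map (fun p => p.1 + 1))
  if !PySem.Str.endswith text "\n" then result ++ [(PySem.Str.len text : Int) + 1]
  else result

-- ===== PRECONDITION & SPEC =====
def Spec_find_line_starts (text : String) (out : List Int) : Prop := out = find_line_starts_alt text
instance (text : String) (out : List Int) : Decidable (Spec_find_line_starts text out) := by unfold Spec_find_line_starts; infer_instance

-- ===== CLAIM (what is proved, stated in full; the proofs are below) =====
def Claim_equal_find_line_starts : Prop := ∀ (text : String), Dom_find_line_starts text → Spec_find_line_starts text (find_line_starts text)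

-- ===== LEMMAS AND PROOFS =====

-- reference list: (i + 1) for every index i of a '\n' in cs, indices offset by base
def nls : List Char → Int → List Int
  | [], _ => []
  | c :: rest, base => if c = '\n' then (base + 1) :: nls rest (base + 1) else nls rest (base + 1)

theorem nls_of_not_mem (cs : List Char) (base : Int) (h : '\n' ∉ cs) : nls cs base = [] := by
  induction cs generalizing base with
  | nil => rfl
  | cons c rest ih =>
    simp only [List.mem_cons, not_or] at h
    simp [nls, Ne.symm h.1, ih _ h.2]

theorem not_mem_of_not_infix (l : List Char) (h : ¬ ['\n'] <:+: l) : '\n' ∉ l := by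
  intro hm
  obtain ⟨s, t, rfl⟩ := List.append_of_mem hm
  exact h ⟨s, t, by simp⟩

theorem prefix_nl_drop (cs : List Char) (i : Nat) (hi : i < cs.length) :
    ['\n'] <+: cs.drop i ↔ cs[i] = '\n' := by
  rw [List.drop_eq_getElem_cons hi, List.cons_prefix_cons]
  exact ⟨fun h => h.1.symm, fun h => ⟨h.symm, List.nil_prefix⟩⟩

theorem nls_split (cs : List Char) (r : Nat) (hr : r < cs.length) (hnl : cs[r] = '\n') :
    ∀ d k, r - k = d → k ≤ r →
    (∀ j (hj : j < cs.length), k ≤ j → j < r → cs[j] ≠ '\n') →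
    nls (cs.drop k) k = ((r : Int) + 1) :: nls (cs.drop (r + 1)) ((r : Int) + 1) := by
  intro d
  induction d with
  | zero =>
    intro k hd hk _
    have hkr : k = r := by omega
    subst hkr
    rw [List.drop_eq_getElem_cons hr]
    simp [nls, hnl]
  | succ d ih =>
    intro k hd hk hmin
    have hkl : k < cs.length := by omega
    have hne : cs[k] ≠ '\n' := hmin k hkl le_rfl (by omega)
    rw [List.drop_eq_getElem_cons hkl]
    simp only [nls, hne, if_false]
    have := ih (k + 1) (by omega) (by omega)
      (fun j hj h1 h2 => hmin j hj (by omega) h2)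
    simpa using this

theorem goA_spec (cs : List Char) :
    ∀ d (k : Nat) (hk : k ≤ cs.length), cs.length - k = d → ∀ (acc : List Int),
    findLineStartsGo cs k hk acc =
      acc ++ (k : Int) :: (nls (cs.drop k) k ++
        (if PySem.Chars.endswith cs ['\n'] then [] else [((cs.length : Int) + 1)])) := by
  intro d
  induction d using Nat.strong_induction_on with
  | _ d ih =>
    intro k hk hd acc
    rw [findLineStartsGo]
    by_cases h : PySem.Chars.findFrom cs ['\n'] k none = -1
    · rw [dif_pos h]
      have hnm : '\n' ∉ cs.drop k :=
        not_mem_of_not_infix _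
          ((PySem.Chars.findFrom_natCast_eq_neg_one_iff cs ['\n'] k hk).mp h)
      rw [nls_of_not_mem _ _ hnm]
      split <;> simp
    · rw [dif_neg h]
      obtain ⟨hkr, hrl⟩ := pvFindBounds cs k hk h
      obtain ⟨h1, h2, h3⟩ := PySem.Chars.findFrom_natCast_spec cs ['\n'] k hk h
      set r := (PySem.Chars.findFrom cs ['\n'] k none).toNat with hrdef
      rw [ih (cs.length - (r + 1)) (by omega) (r + 1) (by omega) rfl]
      have hnl : cs[r] = '\n' := (prefix_nl_drop cs r hrl).mp h2
      have hmin : ∀ j (hj : j < cs.length), k ≤ j → j < r → cs[j] ≠ '\n' := by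
        intro j hj h1' h2' hc
        exact h3 j (by exact_mod_cast h1') (by omega)
          ((prefix_nl_drop cs j hj).mpr hc)
      rw [nls_split cs r hrl hnl (r - k) k rfl hkr hmin]
      simp

theorem alt_comprehension (cs : List Char) :
    ∀ (n : Int),
    ((PySem.List.enumerate cs n).filter (fun p => p.2 == '\n')).map (fun p => p.1 + 1)
      = nls cs n := by
  induction cs with
  | nil => intro n; simp [PySem.List.enumerate_nil, nls]
  | cons c rest ih =>
    intro n
    by_cases hc : c = '\n' <;>
      simp [PySem.List.enumerate_cons, hc, nls, ih]

-- ===== VERDICT (by name: the statement is the Claim_ definition above) =====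
theorem find_line_starts_spec : Claim_equal_find_line_starts := by
  intro text _
  unfold Spec_find_line_starts find_line_starts find_line_starts_alt
  rw [goA_spec text.toList (text.toList.length - 0) 0 (Nat.zero_le _) rfl []]
  simp only [List.drop_zero, List.nil_append, alt_comprehension]
  have he : PySem.Str.endswith text "\n" = PySem.Chars.endswith text.toList ['\n'] := by
    simp [PySem.Str.endswith_eq]
  rw [he]
  cases hE : PySem.Chars.endswith text.toList ['\n'] <;>
    simp [PySem.Str.len]
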